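-- pv_equiv track=rewrite | github.com/gritsai-sergei/DNS_zone_delete | Dns_zones_delete.py | find_zone_blocks
-- ===== SOURCE A (Python) =====
-- def find_zone_blocks(config_lines):
--     """Находит все блоки зон в конфигурации."""
--     blocks = []
--     current_block = []
--     inside_block = False
--
--     for line in config_lines:
--         if line.strip().startswith('zone'):
--             inside_block = True
--             current_block = [line]  # Начало нового блока
--         elif inside_block:
--             current_block.append(line)
--             if '};' in line:  # Конец блока зоны
--                 blocks.append(current_block)
--                 inside_block = False
--
--     return blocks
-- ===== SOURCE B (Python) =====
-- def _cut(body):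
--     """Prefix of body up to and including its first line containing '};', else None."""
--     out = []
--     for l in body:
--         out.append(l)
--         if '};' in l:
--             return out
--     return None
--
--
-- def find_zone_blocks(config_lines):
--     # Stage 1: split the input into segments, each headed by a 'zone' line and
--     # running up to (but not including) the next 'zone' line; the prefix before
--     # the first 'zone' line is dropped.
--     segments = []
--     for line in config_lines:
--         if line.strip().startswith('zone'):
--             segments.append([line])
--         elif segments:
--             segments[-1].append(line)
--     # Stage 2: truncate each segment at its first closing line after the header;
--     # segments without a closing line are discarded.
--     blocks = []
--     for seg in segments:
--         cut = _cut(seg[1:])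
--         if cut is not None:
--             blocks.append([seg[0]] + cut)
--     return blocks
-- ===== Notes on version B (the rewrite author's own statement) =====
-- stated objective: alternative
-- what changed: Replaced A's single-pass state machine (inside_block flag plus a growing current_block) by a two-stage pipeline: stage 1 splits the whole input into zone-headed segments each running to the next 'zone' line, stage 2 independently truncates every segment at its first line containing '};' and discards segments without one.
import Mathlib
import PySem

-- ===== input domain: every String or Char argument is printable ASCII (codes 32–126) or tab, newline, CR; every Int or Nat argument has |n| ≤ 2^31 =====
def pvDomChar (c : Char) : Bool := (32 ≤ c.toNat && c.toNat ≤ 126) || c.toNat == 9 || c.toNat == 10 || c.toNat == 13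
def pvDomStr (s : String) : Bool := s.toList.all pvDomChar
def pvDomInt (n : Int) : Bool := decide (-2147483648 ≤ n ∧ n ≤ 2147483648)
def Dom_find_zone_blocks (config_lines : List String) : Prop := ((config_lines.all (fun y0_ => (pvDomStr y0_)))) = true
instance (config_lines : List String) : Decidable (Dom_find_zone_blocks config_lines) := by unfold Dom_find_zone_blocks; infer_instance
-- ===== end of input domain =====

-- B replaces A's one-pass flag state machine by a two-stage pipeline (split into
-- zone-headed segments, then truncate each at its first closing line); objective: alternative.

-- ===== PORT A =====
-- A: one fold over the lines carrying (blocks, current_block, inside_block).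
def find_zone_blocks (config_lines : List String) : List (List String) :=
  (config_lines.foldl
    (fun (st : List (List String) × List String × Bool) line =>
      let (blocks, current_block, inside_block) := st
      if PySem.Str.startswith (PySem.Str.strip line) "zone" then
        (blocks, [line], true)
      else if inside_block then
        let current_block := current_block ++ [line]
        if PySem.Str.isIn "};" line then
          (blocks ++ [current_block], current_block, false)
        else
          (blocks, current_block, true)
      else
        (blocks, current_block, inside_block))
    ([], [], false)).1

-- ===== PORT B =====
-- B stage 1: split the input into segments, each headed by a 'zone' line
-- ("append a fresh segment on a zone line, otherwise extend the last segment").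
def fzbStage1 (config_lines : List String) : List (List String) :=
  config_lines.foldl
    (fun (segments : List (List String)) line =>
      if PySem.Str.startswith (PySem.Str.strip line) "zone" then
        segments ++ [[line]]
      else
        match segments.getLast? with
        | none => segments
        | some last => segments.dropLast ++ [last ++ [line]])
    []

-- B helper _cut: prefix of body up to and including its first '};' line, else none.
def fzbCut : List String → Option (List String)
  | [] => none
  | l :: rest =>
    if PySem.Str.isIn "};" l then some [l]
    else (fzbCut rest).map (fun b => l :: b)

-- B stage 2: truncate each segment at its first closing line after the header,
-- discarding segments with none.
def find_zone_blocks_alt (config_lines : List String) : List (List String) :=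
  (fzbStage1 config_lines).filterMap
    (fun seg =>
      match seg with
      | [] => none  -- unreachable: stage 1 only builds nonempty segments
      | h :: body => (fzbCut body).map (fun b => h :: b))

-- ===== PRECONDITION & SPEC =====
def Spec_find_zone_blocks (config_lines : List String) (out : List (List String)) : Prop := out = find_zone_blocks_alt config_lines
instance (config_lines : List String) (out : List (List String)) : Decidable (Spec_find_zone_blocks config_lines out) := by unfold Spec_find_zone_blocks; infer_instance

-- ===== CLAIM (what is proved, stated in full; the proofs are below) =====
def Claim_equal_find_zone_blocks : Prop := ∀ (config_lines : List String), Dom_find_zone_blocks config_lines → Spec_find_zone_blocks config_lines (find_zone_blocks config_lines)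

-- ===== LEMMAS AND PROOFS =====

-- Common reference recursion both proofs are led to: outer loop skipping to the
-- next zone line, inner loop collecting the open block.
mutual
def fzbOuter : List String → List (List String)
  | [] => []
  | l :: rest =>
    if PySem.Str.startswith (PySem.Str.strip l) "zone" then fzbInner [l] rest
    else fzbOuter rest
def fzbInner (block : List String) : List String → List (List String)
  | [] => []
  | l :: rest =>
    if PySem.Str.startswith (PySem.Str.strip l) "zone" then fzbInner [l] rest
    else if PySem.Str.isIn "};" l then (block ++ [l]) :: fzbOuter rest
    else fzbInner (block ++ [l]) rest
end

-- A-side invariant: the fold from any state equals the already-collected blocks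
-- followed by what the reference recursion produces from the remaining lines.
theorem fzb_fold_invariant (ls : List String) :
    ∀ (blocks : List (List String)) (cur : List String) (inside : Bool),
      (ls.foldl
        (fun (st : List (List String) × List String × Bool) line =>
          let (blocks, current_block, inside_block) := st
          if PySem.Str.startswith (PySem.Str.strip line) "zone" then
            (blocks, [line], true)
          else if inside_block then
            let current_block := current_block ++ [line]
            if PySem.Str.isIn "};" line then
              (blocks ++ [current_block], current_block, false)
            else
              (blocks, current_block, true)
          else
            (blocks, current_block, inside_block))
        (blocks, cur, inside)).1
      = blocks ++ (if inside then fzbInner cur ls else fzbOuter ls) := by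
  induction ls with
  | nil => intro blocks cur inside; cases inside <;> simp [fzbOuter, fzbInner]
  | cons l rest ih =>
    intro blocks cur inside
    by_cases hz : PySem.Chars.startswith (PySem.Chars.strip l.toList) ['z','o','n','e'] = true
    · cases inside <;>
        · simp only [List.foldl_cons]
          simp [fzbOuter, fzbInner, hz]
          simpa using ih blocks [l] true
    · cases inside with
      | false =>
        simp only [List.foldl_cons]
        simp [fzbOuter, hz]
        simpa using ih blocks cur false
      | true =>
        by_cases hc : PySem.Chars.isIn ['}',';'] l.toList = true
        · simp only [List.foldl_cons]
          simp [fzbInner, hz, hc]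
          simpa using ih (blocks ++ [cur ++ [l]]) (cur ++ [l]) false
        · simp only [List.foldl_cons]
          simp [fzbInner, hz, hc]
          simpa using ih blocks (cur ++ [l]) true

-- the step function of fzbStage1, named for the lemmas
def fzbStep (segments : List (List String)) (line : String) : List (List String) :=
  if PySem.Str.startswith (PySem.Str.strip line) "zone" then
    segments ++ [[line]]
  else
    match segments.getLast? with
    | none => segments
    | some last => segments.dropLast ++ [last ++ [line]]

theorem fzbStage1_eq_foldl_step (ls : List String) :
    fzbStage1 ls = ls.foldl fzbStep [] := rfl

-- the filterMap function of stage 2, named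
def fzbStage2f (seg : List String) : Option (List String) :=
  match seg with
  | [] => none
  | h :: body => (fzbCut body).map (fun b => h :: b)

-- the fold leaves an untouched closed prefix alone once the tail is nonempty
theorem fzb_step_prefix (ls : List String) :
    ∀ (pre segs : List (List String)), segs ≠ [] →
      ls.foldl fzbStep (pre ++ segs) = pre ++ ls.foldl fzbStep segs := by
  induction ls with
  | nil => intro pre segs _; rfl
  | cons l rest ih =>
    intro pre segs hne
    simp only [List.foldl_cons]
    have hlast : segs.getLast? = some (segs.getLast hne) :=
      List.getLast?_eq_some_getLast hne
    have hstep : fzbStep (pre ++ segs) l = pre ++ fzbStep segs l := by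
      unfold fzbStep
      by_cases hz : PySem.Chars.startswith (PySem.Chars.strip l.toList) ['z','o','n','e'] = true
      · simp [hz]
      · simp [hz, List.getLast?_append_of_ne_nil pre hne, hlast,
             List.dropLast_append_of_ne_nil hne]
    rw [hstep]
    have h2 : fzbStep segs l ≠ [] := by
      unfold fzbStep
      by_cases hz : PySem.Chars.startswith (PySem.Chars.strip l.toList) ['z','o','n','e'] = true
      · simp [hz]
      · simp [hz, hlast]
    exact ih pre _ h2

-- appending one line to a body: how fzbCut evolves
theorem fzbCut_append (body : List String) (l : String) :
    fzbCut (body ++ [l]) =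
      match fzbCut body with
      | some b => some b
      | none => if PySem.Str.isIn "};" l then some (body ++ [l]) else none := by
  induction body with
  | nil => simp [fzbCut]
  | cons x xs ih =>
    simp only [List.cons_append, fzbCut, ih]
    by_cases hx : PySem.Chars.isIn ['}',';'] x.toList = true
    · simp [hx]
    · cases h : fzbCut xs with
      | some b => simp [hx]
      | none =>
        by_cases hl : PySem.Chars.isIn ['}',';'] l.toList = true <;>
          simp [PySem.Str.isIn, hx, hl]

-- B-side invariant with one open segment h :: body
theorem fzb_stage_invariant (ls : List String) :
    ∀ (h : String) (body : List String),
      (ls.foldl fzbStep [h :: body]).filterMap fzbStage2f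
        = (match fzbCut body with
           | none => fzbInner (h :: body) ls
           | some b => (h :: b) :: fzbOuter ls) := by
  induction ls with
  | nil =>
    intro h body
    cases hc : fzbCut body <;> simp [fzbStage2f, fzbInner, fzbOuter, hc]
  | cons l rest ih =>
    intro h body
    simp only [List.foldl_cons]
    by_cases hz : PySem.Chars.startswith (PySem.Chars.strip l.toList) ['z','o','n','e'] = true
    · have hstep : fzbStep [h :: body] l = [h :: body] ++ [[l]] := by
        unfold fzbStep; simp [PySem.Str.startswith, PySem.Str.strip, hz]
      rw [hstep, fzb_step_prefix rest [h :: body] [[l]] (by simp)]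
      rw [List.filterMap_append]
      have hil := ih l []
      simp only [fzbCut] at hil
      rw [hil]
      cases hc : fzbCut body <;>
        simp [fzbStage2f, fzbInner, fzbOuter, hc, hz]
    · have hstep : fzbStep [h :: body] l = [h :: (body ++ [l])] := by
        unfold fzbStep; simp [PySem.Str.startswith, PySem.Str.strip, hz]
      rw [hstep, ih h (body ++ [l]), fzbCut_append]
      cases hc : fzbCut body with
      | none =>
        by_cases hl : PySem.Chars.isIn ['}',';'] l.toList = true <;>
          simp [PySem.Str.isIn, hl, fzbInner, hz]
      | some b =>
        simp [fzbOuter, hz]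

-- B equals the reference recursion
theorem fzb_alt_eq_outer (ls : List String) :
    find_zone_blocks_alt ls = fzbOuter ls := by
  unfold find_zone_blocks_alt
  rw [fzbStage1_eq_foldl_step]
  show (ls.foldl fzbStep []).filterMap fzbStage2f = fzbOuter ls
  induction ls with
  | nil => rfl
  | cons l rest ih =>
    simp only [List.foldl_cons]
    by_cases hz : PySem.Chars.startswith (PySem.Chars.strip l.toList) ['z','o','n','e'] = true
    · have hstep : fzbStep [] l = [[l]] := by
        unfold fzbStep; simp [PySem.Str.startswith, PySem.Str.strip, hz]
      rw [hstep]
      have hil := fzb_stage_invariant rest l []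
      simp only [fzbCut] at hil
      rw [hil]
      simp [fzbOuter, hz]
    · have hstep : fzbStep [] l = [] := by
        unfold fzbStep; simp [PySem.Str.startswith, PySem.Str.strip, hz]
      rw [hstep, ih]
      simp [fzbOuter, hz]

-- ===== VERDICT (by name: the statement is the Claim_ definition above) =====
theorem find_zone_blocks_spec : Claim_equal_find_zone_blocks := by
  intro config_lines _
  show _ = _
  rw [fzb_alt_eq_outer]
  unfold find_zone_blocks
  simpa using fzb_fold_invariant config_lines [] [] false
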